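-- pv_equiv track=rewrite | github.com/GauthamBanasandra/Data-mining | Assignment_1/DM-A01-1PI13CS060-Gautham_B_A/summarize.py | classify_species
-- ===== SOURCE A (Python) =====
-- def classify_species(data):
--     species_ = []
--     species = []
--     i = 0
--     species_.append(data[0])
--     for j in range(1, len(data)):
--         if data[j][len(data[j]) - 1] == data[i][len(data[i]) - 1]:
--             species_.append(data[j])
--         else:
--             species.append(species_)
--             species_ = [data[j]]
--         i += 1
--     species.append(species_)
--     return species
-- ===== SOURCE B (Python) =====
-- def classify_species(data):
--     groups = []
--     for row in reversed(data):
--         if groups and groups[0][0][-1] == row[-1]: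
--             groups[0] = [row] + groups[0]
--         else:
--             groups.insert(0, [row])
--     return groups
-- ===== Notes on version B (the rewrite author's own statement) =====
-- stated objective: simpler
-- what changed: Replaced A's index loop over range(1, len(data)) with its i counter and a current-group buffer flushed on change by a single back-to-front pass over the rows themselves that either conses the row onto the head group or opens a new head group.
-- outside the precondition, e.g. on classify_species([]): A raises IndexError, B returns []; on classify_species([[]]): A returns [[[]]], B returns [[[]]]
import Mathlib
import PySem

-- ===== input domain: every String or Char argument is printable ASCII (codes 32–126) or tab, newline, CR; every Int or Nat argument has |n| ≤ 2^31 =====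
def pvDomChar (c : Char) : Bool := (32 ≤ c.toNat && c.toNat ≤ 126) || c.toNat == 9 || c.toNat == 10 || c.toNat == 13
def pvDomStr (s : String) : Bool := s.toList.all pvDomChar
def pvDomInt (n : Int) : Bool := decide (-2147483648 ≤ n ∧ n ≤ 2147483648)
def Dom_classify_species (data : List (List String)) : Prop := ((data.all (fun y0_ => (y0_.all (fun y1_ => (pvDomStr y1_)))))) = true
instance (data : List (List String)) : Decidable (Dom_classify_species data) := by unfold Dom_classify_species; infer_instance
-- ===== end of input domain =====

-- B groups the rows back-to-front with a single fold over the rows themselves (no index bookkeeping),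
-- instead of A's index loop with a current-group buffer flushed on change; objective: simpler.

-- shared helper: the Python expression row[len(row)-1] (A) / row[-1] (B); the two index
-- expressions coincide exactly (len(row)-1 = -1 when the row is empty), default "" is
-- only reachable outside Pre_ (empty row = Python IndexError).
def pyLast (r : List String) : String := PySem.List.pyGetD r ((r.length : Int) - 1) ""

-- ===== PORT A =====
def classify_species (data : List (List String)) : List (List (List String)) :=
  let s0 : List (List String) × List (List (List String)) × Int :=
    ([PySem.List.pyGetD data 0 []], [], 0)
  let r := (PySem.List.pyRange 1 (data.length : Int) 1).foldl
    (fun s j =>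
      let rowj := PySem.List.pyGetD data j []
      let rowi := PySem.List.pyGetD data s.2.2 []
      if pyLast rowj = pyLast rowi
      then (s.1 ++ [rowj], s.2.1, s.2.2 + 1)
      else ([rowj], s.2.1 ++ [s.1], s.2.2 + 1)) s0
  r.2.1 ++ [r.1]

-- ===== PORT B =====
def classify_species_alt (data : List (List String)) : List (List (List String)) :=
  data.foldr (fun row groups =>
    match groups with
    | [] => [[row]]
    | g :: gs =>
      if pyLast (PySem.List.pyGetD g 0 []) = pyLast row
      then (row :: g) :: gs
      else [row] :: g :: gs) []

-- ===== PRECONDITION & SPEC =====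
-- Pre_ excludes the inputs where Python A raises IndexError: the empty list (data[0])
-- and inputs containing an empty row (row[-1]); the single-row input [[]] is excluded too,
-- although A happens to return [[[]]] there (as does B) — an empty row is outside the
-- natural domain of row data.
def Pre_classify_species (data : List (List String)) : Prop :=
  data ≠ [] ∧ ∀ r ∈ data, r ≠ []
instance (data : List (List String)) : Decidable (Pre_classify_species data) := by
  unfold Pre_classify_species; infer_instance
def pvWitness_classify_species : List (List String) := [["1", "a"], ["2", "a"], ["3", "b"]]

def Spec_classify_species (data : List (List String)) (out : List (List (List String))) : Prop := out = classify_species_alt data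
instance (data : List (List String)) (out : List (List (List String))) : Decidable (Spec_classify_species data out) := by unfold Spec_classify_species; infer_instance

-- ===== CLAIM (what is proved, stated in full; the proofs are below) =====
def Claim_equal_classify_species : Prop := ∀ (data : List (List String)), Dom_classify_species data → Pre_classify_species data → Spec_classify_species data (classify_species data)
-- ===== LEMMAS AND PROOFS =====

-- common specification: group the remaining rows `l`, comparing each against `prev`,
-- with current group `cur` (in order).
def grp (cur : List (List String)) (prev : List String) :
    List (List String) → List (List (List String))
  | [] => [cur]
  | r :: rs => if pyLast r = pyLast prev then grp (cur ++ [r]) r rs else cur :: grp [r] r rs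

-- consing a row onto the current group conses it onto the head group of the result
theorem grp_cons_head (l : List (List String)) (cur : List (List String))
    (prev x : List String) :
    grp (x :: cur) prev l = (x :: (grp cur prev l).headI) :: (grp cur prev l).tail := by
  induction l generalizing cur prev with
  | nil => simp [grp]
  | cons r rs ih =>
    unfold grp
    split
    · exact ih (cur ++ [r]) r
    · simp

-- B's foldr computes grp
theorem alt_eq_grp (l : List (List String)) (d : List String) :
    classify_species_alt (d :: l) = grp [d] d l := by
  induction l generalizing d with
  | nil => simp [classify_species_alt, grp]
  | cons r rs ih =>
    have hstep : classify_species_alt (d :: r :: rs) =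
      (match classify_species_alt (r :: rs) with
       | [] => [[d]]
       | g :: gs => if pyLast (PySem.List.pyGetD g 0 []) = pyLast d
                    then (d :: g) :: gs else [d] :: g :: gs) := rfl
    rw [hstep, ih r, grp_cons_head rs [] r r]
    simp only [PySem.List.pyGetD_zero_cons]
    conv_rhs => rw [grp]
    by_cases h : pyLast r = pyLast d
    · rw [if_pos h, if_pos h]
      rw [show ([d] ++ [r]) = (d :: [r]) from rfl, grp_cons_head rs [r] r d,
        grp_cons_head rs [] r r]
      simp
    · rw [if_neg h, if_neg h, ← grp_cons_head rs [] r r]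

-- A's index loop, started at position k with current group cur and output acc,
-- finishes the grouping of the remaining rows
theorem a_loop (data : List (List String)) (k : Nat) (hk : k < data.length)
    (cur : List (List String)) (acc : List (List (List String))) :
    (let r := (PySem.List.pyRange ((k : Int) + 1) (data.length : Int) 1).foldl
      (fun s j =>
        let rowj := PySem.List.pyGetD data j []
        let rowi := PySem.List.pyGetD data s.2.2 []
        if pyLast rowj = pyLast rowi
        then (s.1 ++ [rowj], s.2.1, s.2.2 + 1)
        else ([rowj], s.2.1 ++ [s.1], s.2.2 + 1)) (cur, acc, (k : Int))
     r.2.1 ++ [r.1]) = acc ++ grp cur data[k] (data.drop (k + 1)) := by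
  induction hn : data.length - (k + 1) generalizing k cur acc with
  | zero =>
    have h1 : data.length = k + 1 := by omega
    have h2 : PySem.List.pyRange ((k : Int) + 1) (data.length : Int) 1 = [] := by
      simp [PySem.List.pyRange, h1]
    have h3 : data.drop (k + 1) = [] := List.drop_eq_nil_of_le (by omega)
    simp [h2, h3, grp]
  | succ m ih =>
    have hk1 : k + 1 < data.length := by omega
    have hcons : PySem.List.pyRange ((k : Int) + 1) (data.length : Int) 1 =
        ((k : Int) + 1) :: PySem.List.pyRange (((k : Int) + 1) + 1) (data.length : Int) 1 :=
      PySem.List.pyRange_one_cons (by exact_mod_cast hk1)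
    have hdrop : data.drop (k + 1) = data[k + 1] :: data.drop (k + 2) :=
      List.drop_eq_getElem_cons hk1
    have hgj : PySem.List.pyGetD data ((k : Int) + 1) [] = data[k + 1] := by
      have : ((k : Int) + 1) = ((k + 1 : Nat) : Int) := by push_cast; ring
      rw [this, PySem.List.pyGetD_natCast, List.getD_eq_getElem?_getD,
        List.getElem?_eq_getElem hk1, Option.getD_some]
    have hgi : PySem.List.pyGetD data (k : Int) [] = data[k] := by
      rw [PySem.List.pyGetD_natCast, List.getD_eq_getElem?_getD,
        List.getElem?_eq_getElem hk, Option.getD_some]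
    rw [hcons]
    simp only [List.foldl_cons, hgj, hgi, hdrop, grp]
    by_cases h : pyLast data[k + 1] = pyLast data[k]
    · rw [if_pos h, if_pos h]
      have := ih (k + 1) hk1 (cur ++ [data[k + 1]]) acc (by omega)
      simpa using this
    · rw [if_neg h, if_neg h]
      have := ih (k + 1) hk1 [data[k + 1]] (acc ++ [cur]) (by omega)
      simpa using this

-- ===== VERDICT (by name: the statement is the Claim_ definition above) =====
theorem classify_species_spec : Claim_equal_classify_species := by
  intro data _hdom hpre
  obtain ⟨hne, _⟩ := hpre
  obtain ⟨d, rest, rfl⟩ := List.exists_cons_of_ne_nil hne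
  unfold Spec_classify_species
  rw [alt_eq_grp]
  have h0 : (0 : Nat) < (d :: rest).length := by simp
  have := a_loop (d :: rest) 0 h0 [d] []
  simp only [Nat.cast_zero, zero_add, List.getElem_cons_zero, List.drop_one,
    List.tail_cons, List.nil_append] at this
  unfold classify_species
  simp only [PySem.List.pyGetD_zero_cons]
  exact this
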